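-- pv_equiv track=rewrite | github.com/aatapa/RLScore | rlscore/test/test_learner/test_query_rankrls.py | mapQids
-- ===== SOURCE A (Python) =====
-- def mapQids(qids):
--     """Maps qids to running numbering starting from zero, and partitions
--     the training data indices so that each partition corresponds to one
--     query"""
--     qid_dict = {}
--     folds = {}
--     counter = 0
--     for index, qid in enumerate(qids):
--         if not qid in qid_dict:
--             qid_dict[qid] = counter
--             folds[qid] = []
--             counter += 1
--         folds[qid].append(index)
--     indslist = []
--     for f in folds.values():
--         indslist.append(f)
--     return indslist
-- ===== SOURCE B (Python) =====
-- def mapQids(qids):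
--     """Maps qids to running numbering starting from zero, and partitions
--     the training data indices so that each partition corresponds to one
--     query"""
--     return [[i for i, q in enumerate(qids) if q == qid]
--             for qid in dict.fromkeys(qids)]
-- ===== Notes on version B (the rewrite author's own statement) =====
-- stated objective: simpler
-- what changed: B first deduplicates the qids in first-appearance order (dict.fromkeys) and then builds each group by one filtering scan per distinct qid, instead of A's single pass that threads a qid->number dict, a qid->indices dict and a counter.
import Mathlib
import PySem

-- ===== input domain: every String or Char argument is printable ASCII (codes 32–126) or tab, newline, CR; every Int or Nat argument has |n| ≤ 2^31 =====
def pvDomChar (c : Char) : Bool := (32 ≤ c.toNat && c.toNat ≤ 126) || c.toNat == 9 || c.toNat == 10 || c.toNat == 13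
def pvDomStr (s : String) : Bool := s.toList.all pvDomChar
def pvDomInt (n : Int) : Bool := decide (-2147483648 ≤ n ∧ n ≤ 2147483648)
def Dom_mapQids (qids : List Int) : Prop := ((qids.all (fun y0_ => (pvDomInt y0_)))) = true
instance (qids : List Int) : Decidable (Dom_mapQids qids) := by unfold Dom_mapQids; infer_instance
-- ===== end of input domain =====

-- B deduplicates qids in first-appearance order, then does one filtering scan per distinct qid;
-- same values as A's single accumulating pass (objective: simpler).

-- ===== PORT A =====
-- the loop state is (qid_dict, folds, counter), exactly A's three variables
def mapQidsStep (s : PySem.Dict Int Int × PySem.Dict Int (List Int) × Int)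
    (p : Int × Int) : PySem.Dict Int Int × PySem.Dict Int (List Int) × Int :=
  let s' := if s.1.contains p.2 then s else (s.1.insert p.2 s.2.2, s.2.1.insert p.2 [], s.2.2 + 1)
  (s'.1, s'.2.1.modify p.2 [] (· ++ [p.1]), s'.2.2)

def mapQids (qids : List Int) : List (List Int) :=
  let st := (PySem.List.enumerate qids 0).foldl mapQidsStep
      (PySem.Dict.empty, PySem.Dict.empty, 0)
  st.2.1.values.foldl (fun acc f => acc ++ [f]) []

-- ===== PORT B =====
def mapQids_alt (qids : List Int) : List (List Int) :=
  (PySem.List.dedup qids).map (fun qid =>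
    ((PySem.List.enumerate qids 0).filter (fun p => p.2 == qid)).map (·.1))

-- ===== PRECONDITION & SPEC =====
def Spec_mapQids (qids : List Int) (out : List (List Int)) : Prop := out = mapQids_alt qids
instance (qids : List Int) (out : List (List Int)) : Decidable (Spec_mapQids qids out) := by unfold Spec_mapQids; infer_instance

-- ===== CLAIM (what is proved, stated in full; the proofs are below) =====
def Claim_equal_mapQids : Prop := ∀ (qids : List Int), Dom_mapQids qids → Spec_mapQids qids (mapQids qids)

-- ===== LEMMAS AND PROOFS =====

-- A's folds component equals the plain grouping fold (the qid_dict/counter components only gate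
-- an insert of [] that `modify` with default [] makes redundant), given synced key sets.
theorem mapQids_folds_eq (l : List (Int × Int)) (d1 : PySem.Dict Int Int)
    (d2 : PySem.Dict Int (List Int)) (c : Int)
    (h : ∀ k, d1.contains k = d2.contains k) :
    (l.foldl mapQidsStep (d1, d2, c)).2.1
      = l.foldl (fun d p => d.modify p.2 [] (· ++ [p.1])) d2 := by
  induction l generalizing d1 d2 c with
  | nil => rfl
  | cons p t ih =>
    simp only [List.foldl_cons, mapQidsStep]
    by_cases hc : d1.contains p.2
    · simp only [hc, if_true]
      exact ih _ _ _ (fun k => by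
        by_cases hk : k = p.2
        · subst hk; simp [PySem.Dict.contains_modify, ← h, hc]
        · simp [PySem.Dict.contains_modify, hk, h k])
    · have hc' : d1.contains p.2 = false := by simpa using hc
      have h2 : d2.contains p.2 = false := by rw [← h]; exact hc'
      simp only [hc', Bool.false_eq_true, if_false]
      have hmod : (d2.insert p.2 []).modify p.2 [] (· ++ [p.1])
          = d2.modify p.2 [] (· ++ [p.1]) := by
        simp [PySem.Dict.modify, PySem.Dict.getD_insert_self,
          PySem.Dict.getD_of_not_contains d2 [] h2, PySem.Dict.insert_insert_self]
      rw [hmod]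
      exact ih _ _ _ (fun k => by
        simp [PySem.Dict.contains_insert, PySem.Dict.contains_modify, h k])

-- ===== VERDICT (by name: the statement is the Claim_ definition above) =====
theorem mapQids_spec : Claim_equal_mapQids := by
  intro qids _
  unfold Spec_mapQids mapQids mapQids_alt
  rw [PySem.List.foldl_append_singleton_eq_self]
  rw [mapQids_folds_eq _ _ _ _ (fun k => by simp)]
  set l := PySem.List.enumerate qids 0 with hl
  have hfold : l.foldl (fun d p => d.modify p.2 [] (· ++ [p.1])) PySem.Dict.empty
      = (l.map Prod.swap).foldl (fun d p => d.modify p.1 [] (· ++ [p.2])) PySem.Dict.empty := by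
    rw [List.foldl_map]; rfl
  rw [hfold]
  have hnd : ((l.map Prod.swap).foldl (fun d p => d.modify p.1 [] (· ++ [p.2]))
      PySem.Dict.empty).keys.Nodup :=
    PySem.Dict.nodup_keys_foldl_modify_key _ _ _ _ _ (by simp)
  rw [List.nil_append, PySem.Dict.values_eq_map_keys _ hnd []]
  rw [PySem.Dict.keys_foldl_modify_key]
  have hkeys : PySem.Set.update (PySem.Dict.empty (κ := Int) (ν := List Int)).keys
      ((l.map Prod.swap).map (·.1)) = PySem.List.dedup qids := by
    simp only [PySem.Set.update, hl, PySem.Set.ofList_eq_foldl, PySem.List.dedup_eq_ofList,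
      PySem.Dict.keys_empty]
    rw [List.map_map,
      show ((fun (x : Int × Int) => x.1) ∘ Prod.swap) = (fun (x : Int × Int) => x.2) from rfl,
      PySem.List.map_snd_enumerate]
  rw [hkeys]
  refine List.map_congr_left (fun k _ => ?_)
  rw [PySem.Dict.getD_foldl_modify_append]
  simp only [List.filter_map, List.map_map]
  rfl
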